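-- pv_equiv track=rewrite | github.com/vara-prasad-789/prism_app_vara | tis.py | find_the_first_table_data
-- ===== SOURCE A (Python) =====
-- def find_the_first_table_data(data):
--     num_columns = 4  # Number of columns in each row
--     table_data = []
--     row = []
--     sno_index = 0  # Index of the 'SR. NO.' column
--     category_index = 1  # Index of the 'INFORMATION CATEGORY' column
--     for item in data:
--         row.append(item)
--         if len(row) == num_columns:
--             table_data.append(row)
--             row = []
--         elif len(row) > num_columns:
--             table_data.append(row[:num_columns])
--             row = row[num_columns:]
--
--     # Store values in a dictionary based on 'INFORMATION CATEGORY'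
--     dict_data = {}
--     for row in table_data[1:]:  # Exclude the header row
--         sno = row[sno_index]
--         category = row[category_index]
--         processed_value = row[category_index + 1]
--         derived_value = row[category_index + 2]
--         dict_data[category] = {
--             'sno': sno,
--             'PROCESSED VALUE': processed_value,
--             'DERIVED VALUE': derived_value
--         }
--
--     return dict_data
-- ===== SOURCE B (Python) =====
-- def find_the_first_table_data(data):
--     it = iter(data)
--     rows = list(zip(it, it, it, it))  # grouper: complete 4-tuples, trailing partial dropped
--     return {cat: {'sno': sno, 'PROCESSED VALUE': pv, 'DERIVED VALUE': dv}
--             for sno, cat, pv, dv in rows[1:]}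
-- ===== Notes on version B (the rewrite author's own statement) =====
-- stated objective: idiomatic
-- what changed: Replaces A's element-by-element row accumulator (pending-row list, append, dead overflow branch) plus a second dict-building loop with the grouper idiom list(zip(it,it,it,it)) that takes complete 4-tuples directly, feeding a single dict comprehension over rows[1:].
import Mathlib
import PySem

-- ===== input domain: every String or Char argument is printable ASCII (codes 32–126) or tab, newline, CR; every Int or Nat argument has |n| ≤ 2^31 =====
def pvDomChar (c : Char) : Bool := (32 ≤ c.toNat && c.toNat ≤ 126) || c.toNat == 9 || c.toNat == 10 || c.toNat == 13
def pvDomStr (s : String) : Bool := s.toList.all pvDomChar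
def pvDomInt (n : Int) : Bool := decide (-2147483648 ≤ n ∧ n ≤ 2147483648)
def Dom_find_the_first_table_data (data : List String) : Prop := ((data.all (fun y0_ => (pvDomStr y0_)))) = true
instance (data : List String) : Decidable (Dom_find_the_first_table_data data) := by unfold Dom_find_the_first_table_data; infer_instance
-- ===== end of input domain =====

-- B replaces A's element-by-element row accumulator + second dict loop with the
-- grouper idiom (complete 4-tuples taken directly) feeding one dict comprehension
-- over rows[1:] (objective: idiomatic; same asymptotic cost).

-- ===== PORT A =====
-- one step of A's chunking loop: append item to the pending row, flush when full
def pvStepA (st : List (List String) × List String) (item : String) :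
    List (List String) × List String :=
  let row := st.2 ++ [item]
  if row.length = 4 then (st.1 ++ [row], [])
  else if row.length > 4 then
    (st.1 ++ [PySem.List.slice row none (some 4)], PySem.List.slice row (some 4) none)
  else (st.1, row)

def find_the_first_table_data (data : List String) : List (String × List (String × String)) :=
  let table_data := (data.foldl pvStepA ([], [])).1
  let dict_data :=
    (PySem.List.slice table_data (some 1) none).foldl
      (fun d row =>
        let sno := PySem.List.pyGetD row (0 : Int) ""
        let category := PySem.List.pyGetD row (1 : Int) ""
        let processed_value := PySem.List.pyGetD row (2 : Int) ""
        let derived_value := PySem.List.pyGetD row (3 : Int) ""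
        d.insert category
          [("sno", sno), ("PROCESSED VALUE", processed_value),
           ("DERIVED VALUE", derived_value)])
      PySem.Dict.empty
  dict_data.items

-- ===== PORT B =====
-- rows = list(zip(it, it, it, it)): complete 4-tuples, trailing partial dropped
def pvGroup4 : List String → List (String × String × String × String)
  | a :: b :: c :: d :: rest => (a, b, c, d) :: pvGroup4 rest
  | _ => []

def find_the_first_table_data_alt (data : List String) : List (String × List (String × String)) :=
  ((PySem.List.slice (pvGroup4 data) (some 1) none).foldl
      (fun d r =>
        d.insert r.2.1
          [("sno", r.1), ("PROCESSED VALUE", r.2.2.1), ("DERIVED VALUE", r.2.2.2)])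
      PySem.Dict.empty).items

-- ===== PRECONDITION & SPEC =====
def Spec_find_the_first_table_data (data : List String) (out : List (String × List (String × String))) : Prop := out = find_the_first_table_data_alt data
instance (data : List String) (out : List (String × List (String × String))) : Decidable (Spec_find_the_first_table_data data out) := by unfold Spec_find_the_first_table_data; infer_instance

-- ===== CLAIM (what is proved, stated in full; the proofs are below) =====
def Claim_equal_find_the_first_table_data : Prop := ∀ (data : List String), Dom_find_the_first_table_data data → Spec_find_the_first_table_data data (find_the_first_table_data data)

-- ===== LEMMAS AND PROOFS =====

-- the chunk list A's first loop produces, as a recursive function of (pending row, rest)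
def pvChunks : List String → List String → List (List String)
  | _, [] => []
  | row, x :: xs =>
    if (row ++ [x]).length = 4 then (row ++ [x]) :: pvChunks [] xs
    else pvChunks (row ++ [x]) xs

theorem pvStepA_fold (data : List String) :
    ∀ (td : List (List String)) (row : List String), row.length < 4 →
      (data.foldl pvStepA (td, row)).1 = td ++ pvChunks row data := by
  induction data with
  | nil => intro td row _; simp [pvChunks]
  | cons x xs ih =>
    intro td row h
    simp only [List.foldl_cons, pvChunks]
    by_cases h4 : (row ++ [x]).length = 4
    · rw [if_pos h4]
      have : pvStepA (td, row) x = (td ++ [row ++ [x]], []) := by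
        simp [pvStepA, h4]
      rw [this, ih _ _ (by simp)]
      simp
    · rw [if_neg h4]
      have : pvStepA (td, row) x = (td, row ++ [x]) := by
        simp only [pvStepA]
        rw [if_neg h4, if_neg (by simp only [List.length_append, List.length_cons, List.length_nil]; omega)]
      rw [this, ih _ _ (by simp at *; omega)]

theorem pvChunks_eq_map_group4 (data : List String) :
    pvChunks [] data = (pvGroup4 data).map (fun r => [r.1, r.2.1, r.2.2.1, r.2.2.2]) := by
  induction data using pvGroup4.induct with
  | case1 a b c d rest ih =>
    simp [pvChunks, pvGroup4, ih]
  | case2 data h =>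
    rcases data with _ | ⟨a, _ | ⟨b, _ | ⟨c, _ | ⟨d, rest⟩⟩⟩⟩
    · simp [pvChunks, pvGroup4]
    · simp [pvChunks, pvGroup4]
    · simp [pvChunks, pvGroup4]
    · simp [pvChunks, pvGroup4]
    · exact absurd rfl (h a b c d rest)

-- ===== VERDICT (by name: the statement is the Claim_ definition above) =====
theorem find_the_first_table_data_spec : Claim_equal_find_the_first_table_data := by
  intro data _
  show find_the_first_table_data data = find_the_first_table_data_alt data
  unfold find_the_first_table_data find_the_first_table_data_alt
  rw [pvStepA_fold data [] [] (by simp)]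
  rw [List.nil_append, pvChunks_eq_map_group4]
  simp only [PySem.List.slice_from_one]
  rw [← List.map_tail, List.foldl_map]
  congr 1
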